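-- pv_equiv track=rewrite | github.com/Vedant2311/Indic-Parallel-Corpus-Boli | test_collection/form_clusters.py | get_dataset_stats
-- ===== SOURCE A (Python) =====
-- def get_dataset_stats(test_cluster):
--     dataset_tuples = []
--     current_dataset = test_cluster[0][-1]
--     current_count=0
--     for i in range(len(test_cluster)):
--         if test_cluster[i][-1] == current_dataset:
--             current_count = current_count+1
--         else:
--             dataset_tuples.append((current_dataset, current_count))
--             current_dataset = test_cluster[i][-1]
--             current_count=1
--     dataset_tuples.append((current_dataset, current_count))
--     return dataset_tuples
-- ===== SOURCE B (Python) =====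
-- def get_dataset_stats(test_cluster):
--     # Two-pointer span scan: for each run, find its end with an inner scan,
--     # append (label, run length) at once.
--     result = []
--     i = 0
--     n = len(test_cluster)
--     while i < n:
--         key = test_cluster[i][-1]
--         j = i + 1
--         while j < n and test_cluster[j][-1] == key:
--             j += 1
--         result.append((key, j - i))
--         i = j
--     return result
-- ===== Notes on version B (the rewrite author's own statement) =====
-- stated objective: simpler
-- what changed: Replaces the current_dataset/current_count state machine with deferred trailing append by a two-pointer span scan that emits each (label, run length) pair as soon as the run's end is found; B needs no running state or final flush.
import Mathlib
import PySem

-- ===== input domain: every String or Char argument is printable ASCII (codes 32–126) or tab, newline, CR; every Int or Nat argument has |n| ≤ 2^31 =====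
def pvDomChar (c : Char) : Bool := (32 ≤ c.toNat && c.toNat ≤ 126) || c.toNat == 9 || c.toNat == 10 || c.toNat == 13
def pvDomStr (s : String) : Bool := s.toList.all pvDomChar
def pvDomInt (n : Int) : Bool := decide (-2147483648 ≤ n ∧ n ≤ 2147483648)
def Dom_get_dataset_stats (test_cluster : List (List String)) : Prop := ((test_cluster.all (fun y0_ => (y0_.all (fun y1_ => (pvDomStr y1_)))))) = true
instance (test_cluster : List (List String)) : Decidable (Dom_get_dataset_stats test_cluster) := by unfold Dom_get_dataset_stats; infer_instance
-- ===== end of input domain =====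

-- B replaces A's current_dataset/current_count state machine by a two-pointer span
-- scan that emits each (label, run length) pair whole (objective: simpler).


-- shared tiny helper: Python's row[-1]; the "" default is only reached outside Pre_
def pvLast (row : List String) : String := (PySem.List.pyGet? row (-1)).getD ""

-- ===== PORT A =====
-- A's for-loop as structural recursion over the same state (current_dataset, current_count, dataset_tuples)
def pvLoopA : String → Int → List (String × Int) → List (List String) → List (String × Int)
  | cd, cc, acc, [] => acc ++ [(cd, cc)]
  | cd, cc, acc, r :: rs =>
      if pvLast r == cd then pvLoopA cd (cc + 1) acc rs
      else pvLoopA (pvLast r) 1 (acc ++ [(cd, cc)]) rs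

def get_dataset_stats (test_cluster : List (List String)) : List (String × Int) :=
  pvLoopA (pvLast (test_cluster.headD [])) 0 [] test_cluster

-- ===== PORT B =====
-- Source B's inner while loop: length of the leading run with label `key`, and the remainder
def pvTakeRun : String → List (List String) → Nat × List (List String)
  | _, [] => (0, [])
  | key, r :: rs =>
      if pvLast r == key then
        let p := pvTakeRun key rs
        (p.1 + 1, p.2)
      else (0, r :: rs)

-- Source B's outer while loop; the fuel (bounded by the list length) only guards totality
def pvGroups : Nat → List (List String) → List (String × Int)
  | 0, _ => []
  | _, [] => []
  | fuel + 1, r :: rs =>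
      let key := pvLast r
      let p := pvTakeRun key rs
      (key, (p.1 : Int) + 1) :: pvGroups fuel p.2

def get_dataset_stats_alt (test_cluster : List (List String)) : List (String × Int) :=
  pvGroups test_cluster.length test_cluster

-- ===== PRECONDITION & SPEC =====
-- Pre_ excludes exactly the inputs where A raises IndexError: the empty list
-- (test_cluster[0]) and any row that is empty (row[-1]).
def Pre_get_dataset_stats (test_cluster : List (List String)) : Prop :=
  test_cluster ≠ [] ∧ ∀ r ∈ test_cluster, r ≠ []
instance (test_cluster : List (List String)) : Decidable (Pre_get_dataset_stats test_cluster) := by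
  unfold Pre_get_dataset_stats; infer_instance

def pvWitness_get_dataset_stats : List (List String) := [["a", "x"], ["b", "x"], ["c", "y"]]

def Spec_get_dataset_stats (test_cluster : List (List String)) (out : List (String × Int)) : Prop :=
  out = get_dataset_stats_alt test_cluster
instance (test_cluster : List (List String)) (out : List (String × Int)) : Decidable (Spec_get_dataset_stats test_cluster out) := by
  unfold Spec_get_dataset_stats; infer_instance

-- ===== CLAIM (what is proved, stated in full; the proofs are below) =====
def Claim_equal_get_dataset_stats : Prop := ∀ (test_cluster : List (List String)), Dom_get_dataset_stats test_cluster → Pre_get_dataset_stats test_cluster → Spec_get_dataset_stats test_cluster (get_dataset_stats test_cluster)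

-- ===== LEMMAS AND PROOFS =====

theorem pvTakeRun_len_le (key : String) (rs : List (List String)) :
    (pvTakeRun key rs).2.length ≤ rs.length := by
  induction rs with
  | nil => simp [pvTakeRun]
  | cons r rs ih =>
      simp only [pvTakeRun]
      split
      · simpa using Nat.le_trans ih (Nat.le_succ _)
      · simp

-- Source B's outer while loop; the fuel (bounded by the list length) only guards totality

-- the accumulator of A's loop just prefixes the result
theorem pvLoopA_acc (rs : List (List String)) :
    ∀ cd cc acc, pvLoopA cd cc acc rs = acc ++ pvLoopA cd cc [] rs := by
  induction rs with
  | nil => intro cd cc acc; simp [pvLoopA]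
  | cons r rs ih =>
      intro cd cc acc
      simp only [pvLoopA]
      split
      · rw [ih, ih cd (cc + 1) []]
      · simp only [List.nil_append]
        rw [ih, ih (pvLast r) 1 [(cd, cc)]]
        simp

-- enough fuel computes the same groups
theorem pvGroups_fuel (fuel : Nat) :
    ∀ rs : List (List String), rs.length ≤ fuel → pvGroups fuel rs = pvGroups rs.length rs := by
  induction fuel using Nat.strong_induction_on with
  | _ fuel ih =>
      intro rs hle
      match fuel, rs with
      | 0, [] => rfl
      | _ + 1, [] => rfl
      | f + 1, r :: rs =>
          simp only [pvGroups, List.length_cons]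
          have h1 : (pvTakeRun (pvLast r) rs).2.length ≤ f := by
            have := pvTakeRun_len_le (pvLast r) rs
            simp only [List.length_cons] at hle
            omega
          have h2 : (pvTakeRun (pvLast r) rs).2.length ≤ rs.length := pvTakeRun_len_le _ _
          rw [ih f (Nat.lt_succ_self f) _ h1,
              ih rs.length (by simp only [List.length_cons] at hle; omega) _ h2]

-- A's loop, started on (cd, cc), produces the current run extended, then B's result on the rest
theorem pvLoopA_eq_groups (rs : List (List String)) :
    ∀ cd cc, pvLoopA cd cc [] rs =
      (cd, cc + ((pvTakeRun cd rs).1 : Int)) ::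
        pvGroups (pvTakeRun cd rs).2.length (pvTakeRun cd rs).2 := by
  induction rs with
  | nil => intro cd cc; simp [pvLoopA, pvTakeRun, pvGroups]
  | cons r rs ih =>
      intro cd cc
      by_cases h : pvLast r == cd
      · simp only [pvLoopA, pvTakeRun, h, if_pos]
        rw [ih]
        push_cast
        ring_nf
      · simp only [pvLoopA, pvTakeRun, h, Bool.false_eq_true, if_neg, not_false_iff]
        rw [pvLoopA_acc, ih]
        simp only [List.length_cons, pvGroups, List.nil_append]
        rw [pvGroups_fuel rs.length _ (pvTakeRun_len_le _ _)]
        push_cast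
        ring_nf
        simp

-- the whole programs agree on nonempty input
theorem main_eq (r : List String) (rs : List (List String)) :
    get_dataset_stats (r :: rs) = get_dataset_stats_alt (r :: rs) := by
  simp only [get_dataset_stats, get_dataset_stats_alt, List.headD, pvLoopA, beq_self_eq_true,
    if_pos, List.length_cons, pvGroups]
  rw [pvLoopA_eq_groups, pvGroups_fuel rs.length _ (pvTakeRun_len_le _ _)]
  push_cast
  ring_nf

-- ===== VERDICT (by name: the statement is the Claim_ definition above) =====
theorem get_dataset_stats_spec : Claim_equal_get_dataset_stats := by
  intro tc _ hpre
  unfold Spec_get_dataset_stats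
  match tc with
  | [] => exact absurd rfl hpre.1
  | r :: rs => exact main_eq r rs
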